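-- pv_equiv track=rewrite | github.com/jguida941/-adaptive-hashmap-studio | src/adhash/workloads/dna.py | _extract_numeric_token
-- ===== SOURCE A (Python) =====
-- from collections import Counter, deque
-- from typing import Deque, Dict, Iterable, List, Mapping, MutableMapping, Optional, Tuple
--
-- def _extract_numeric_token(key: str) -> Optional[int]:
--     if not key:
--         return None
--     if key.isdigit() or (key[0] == "-" and key[1:].isdigit()):
--         try:
--             return int(key)
--         except ValueError:
--             return None
--     suffix: Deque[str] = deque()
--     for ch in reversed(key):
--         if ch.isdigit():
--             suffix.appendleft(ch)
--         else:
--             break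
--     if suffix:
--         try:
--             return int("".join(suffix))
--         except ValueError:
--             return None
--     return None
-- ===== SOURCE B (Python) =====
-- def _extract_numeric_token(key):
--     i = len(key)
--     while i > 0 and key[i - 1].isdigit():
--         i -= 1
--     digits = key[i:]
--     if not digits:
--         return None
--     prefix = key[:i]
--     token = prefix + digits if prefix in ("", "-") else digits
--     try:
--         return int(token)
--     except ValueError:
--         return None
-- ===== Notes on version B (the rewrite author's own statement) =====
-- stated objective: simpler
-- what changed: Replaces A's two-branch structure (whole-string isdigit fast path plus a reversed-iteration deque suffix loop) with a single backward index scan that finds the trailing digit run, then one sign decision on the prefix.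
import Mathlib
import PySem

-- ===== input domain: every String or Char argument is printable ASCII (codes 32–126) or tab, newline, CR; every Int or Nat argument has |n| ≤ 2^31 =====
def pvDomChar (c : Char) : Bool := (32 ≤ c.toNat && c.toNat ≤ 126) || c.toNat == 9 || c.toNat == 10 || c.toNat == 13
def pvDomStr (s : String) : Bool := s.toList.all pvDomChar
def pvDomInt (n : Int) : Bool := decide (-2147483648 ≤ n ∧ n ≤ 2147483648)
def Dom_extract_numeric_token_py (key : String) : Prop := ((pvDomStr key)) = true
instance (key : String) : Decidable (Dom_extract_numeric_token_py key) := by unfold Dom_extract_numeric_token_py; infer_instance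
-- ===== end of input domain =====

-- B replaces A's two-branch structure (whole-string isdigit fast path + reversed deque suffix loop)
-- with one backward index scan for the trailing digit run plus a sign decision on the prefix (objective: simpler).

-- ===== PORT A =====
-- A's 'for ch in reversed(key): if ch.isdigit(): suffix.appendleft(ch) else: break'
def pvA_suffix : List Char → List Char → List Char
  | [], acc => acc
  | c :: rest, acc => if PySem.Chars.isdigit c then pvA_suffix rest (c :: acc) else acc

def extract_numeric_token_py (key : String) : Option Int :=
  let cs := key.toList
  if cs.isEmpty then none
  else if PySem.Chars.strIsdigit cs ||
      (PySem.List.pyGet? cs 0 == some '-' &&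
       PySem.Chars.strIsdigit (PySem.List.slice cs (some 1) none)) then
    PySem.Int.ofChars? cs          -- int(key); try/except ValueError → none is ofChars?'s none
  else
    let suffix := pvA_suffix cs.reverse []
    if !suffix.isEmpty then PySem.Int.ofChars? suffix else none

-- ===== PORT B =====
-- B's 'i = len(key); while i > 0 and key[i-1].isdigit(): i -= 1' (key[i-1] is in range when 1 ≤ i ≤ len)
def pvB_scan (cs : List Char) : Nat → Nat
  | 0 => 0
  | j + 1 => if PySem.Chars.isdigit (cs.getD j ' ') then pvB_scan cs j else j + 1

def extract_numeric_token_py_alt (key : String) : Option Int :=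
  let cs := key.toList
  let i := pvB_scan cs cs.length
  let digits := PySem.List.slice cs (some (i : Int)) none      -- key[i:]
  if digits.isEmpty then none
  else
    let pre := PySem.List.slice cs none (some (i : Int))       -- key[:i]
    let token := if pre == ([] : List Char) || pre == ['-'] then pre ++ digits else digits
    PySem.Int.ofChars? token       -- int(token); except ValueError → none

-- ===== PRECONDITION & SPEC =====
def Spec_extract_numeric_token_py (key : String) (out : Option Int) : Prop := out = extract_numeric_token_py_alt key
instance (key : String) (out : Option Int) : Decidable (Spec_extract_numeric_token_py key out) := by unfold Spec_extract_numeric_token_py; infer_instance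

-- ===== CLAIM (what is proved, stated in full; the proofs are below) =====
def Claim_equal_extract_numeric_token_py : Prop := ∀ (key : String), Dom_extract_numeric_token_py key → Spec_extract_numeric_token_py key (extract_numeric_token_py key)

-- ===== LEMMAS AND PROOFS =====

theorem pvA_suffix_eq (l acc : List Char) :
    pvA_suffix l acc = (l.takeWhile PySem.Chars.isdigit).reverse ++ acc := by
  induction l generalizing acc with
  | nil => simp [pvA_suffix]
  | cons c rest ih =>
    by_cases h : PySem.Chars.isdigit c = true
    · simp [pvA_suffix, h, ih]
    · simp [pvA_suffix, h]

theorem pvB_scan_le (cs : List Char) (j : Nat) : pvB_scan cs j ≤ j := by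
  induction j with
  | zero => simp [pvB_scan]
  | succ j ih =>
    simp only [pvB_scan]
    split
    · omega
    · omega

theorem pvB_scan_append (xs : List Char) (c : Char) (j : Nat) (hj : j ≤ xs.length) :
    pvB_scan (xs ++ [c]) j = pvB_scan xs j := by
  induction j with
  | zero => rfl
  | succ j ih =>
    have hx : (xs ++ [c]).getD j ' ' = xs.getD j ' ' := by
      have : j < xs.length := by omega
      simp [List.getD, List.getElem?_append_left this]
    simp only [pvB_scan, hx]
    split
    · exact ih (by omega)
    · rfl

theorem pvB_scan_drop (cs : List Char) :
    cs.drop (pvB_scan cs cs.length) = (cs.reverse.takeWhile PySem.Chars.isdigit).reverse := by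
  induction cs using List.reverseRecOn with
  | nil => simp [pvB_scan]
  | append_singleton xs c ih =>
    by_cases h : PySem.Chars.isdigit c = true
    · have hscan : pvB_scan (xs ++ [c]) (xs ++ [c]).length = pvB_scan xs xs.length := by
        have hl : (xs ++ [c]).length = xs.length + 1 := by simp
        rw [hl]
        simp only [pvB_scan]
        have hx : (xs ++ [c]).getD xs.length ' ' = c := by
          simp [List.getD]
        rw [hx, if_pos h]
        exact pvB_scan_append xs c xs.length le_rfl
      rw [hscan]
      have hle := pvB_scan_le xs xs.length
      rw [List.drop_append_of_le_length hle, ih]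
      simp [h]
    · have hscan : pvB_scan (xs ++ [c]) (xs ++ [c]).length = xs.length + 1 := by
        have hl : (xs ++ [c]).length = xs.length + 1 := by simp
        rw [hl]
        simp only [pvB_scan]
        have hx : (xs ++ [c]).getD xs.length ' ' = c := by
          simp [List.getD]
        rw [hx, if_neg h]
      rw [hscan]
      simp [h]

theorem pvB_scan_take (cs : List Char) :
    cs.take (pvB_scan cs cs.length) = (cs.reverse.dropWhile PySem.Chars.isdigit).reverse := by
  have h1 : cs.take (pvB_scan cs cs.length) ++ cs.drop (pvB_scan cs cs.length) = cs :=
    List.take_append_drop _ _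
  have h2 : (cs.reverse.dropWhile PySem.Chars.isdigit).reverse ++
      (cs.reverse.takeWhile PySem.Chars.isdigit).reverse = cs := by
    rw [← List.reverse_append, List.takeWhile_append_dropWhile, List.reverse_reverse]
  rw [pvB_scan_drop] at h1
  exact List.append_cancel_right (h1.trans h2.symm)

-- ===== VERDICT (by name: the statement is the Claim_ definition above) =====
theorem extract_numeric_token_py_spec : Claim_equal_extract_numeric_token_py := by
  intro key _
  unfold Spec_extract_numeric_token_py extract_numeric_token_py extract_numeric_token_py_alt
  set cs := key.toList with hcs
  have hdrop : cs.drop (pvB_scan cs cs.length) =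
      (cs.reverse.takeWhile PySem.Chars.isdigit).reverse := pvB_scan_drop cs
  have htake : cs.take (pvB_scan cs cs.length) =
      (cs.reverse.dropWhile PySem.Chars.isdigit).reverse := pvB_scan_take cs
  have hslice1 : PySem.List.slice cs (some 1) none = cs.drop 1 := by
    simpa using PySem.List.slice_from_natCast cs 1
  have hsliceD : PySem.List.slice cs (some (pvB_scan cs cs.length : Int)) none
      = cs.drop (pvB_scan cs cs.length) := PySem.List.slice_from_natCast cs _
  have hsliceP : PySem.List.slice cs none (some (pvB_scan cs cs.length : Int))
      = cs.take (pvB_scan cs cs.length) := PySem.List.slice_to_natCast cs _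
  by_cases h0 : cs.isEmpty
  · -- empty key: both return none
    have hnil : cs = [] := List.isEmpty_iff.mp h0
    simp [hnil, pvB_scan, PySem.List.slice]
  · simp only [h0, Bool.false_eq_true, if_false, hslice1, hsliceD, hsliceP]
    have hne : cs ≠ [] := fun h => h0 (List.isEmpty_iff.mpr h)
    by_cases hall : PySem.Chars.strIsdigit cs = true
    · -- the whole key is digits: A takes the int(key) fast path, B sees an empty prefix
      have halld : ∀ x ∈ cs, PySem.Chars.isdigit x = true := by
        unfold PySem.Chars.strIsdigit at hall
        rw [Bool.and_eq_true] at hall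
        exact fun x hx => List.all_eq_true.mp hall.2 x hx
      have hdw : cs.reverse.dropWhile PySem.Chars.isdigit = [] :=
        List.dropWhile_eq_nil_iff.mpr (fun x hx => halld x (List.mem_reverse.mp hx))
      have hi0 : pvB_scan cs cs.length = 0 := by
        rw [hdw] at htake
        simp only [List.reverse_nil] at htake
        rcases List.take_eq_nil_iff.mp htake with h | h
        · exact h
        · exact absurd h hne
      have hlen : 0 < cs.length := List.length_pos_of_ne_nil hne
      simp [hall, hi0, hne]
    · by_cases hm : (PySem.List.pyGet? cs 0 == some '-' &&
          PySem.Chars.strIsdigit (cs.drop 1)) = true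
      · -- key is '-' followed by digits: A's signed fast path, B's prefix is exactly "-"
        rw [Bool.and_eq_true] at hm
        obtain ⟨hhd, htl⟩ := hm
        obtain ⟨c, rest, hcons⟩ := List.exists_cons_of_ne_nil hne
        have hc : c = '-' := by
          rw [hcons] at hhd
          have hg : PySem.List.pyGet? (c :: rest) 0 = some c := by simp [pysem]
          rw [hg] at hhd
          exact (Option.some_inj.mp (beq_iff_eq.mp hhd))
        subst hc
        have hrest : PySem.Chars.strIsdigit rest = true := by simpa [hcons] using htl
        unfold PySem.Chars.strIsdigit at hrest
        rw [Bool.and_eq_true] at hrest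
        have hrestne : rest ≠ [] := fun h => by simp [h] at hrest
        have hrestd : ∀ x ∈ rest, PySem.Chars.isdigit x = true :=
          fun x hx => List.all_eq_true.mp hrest.2 x hx
        have hrev : cs.reverse = rest.reverse ++ ['-'] := by simp [hcons]
        have htw : cs.reverse.takeWhile PySem.Chars.isdigit = rest.reverse := by
          rw [hrev, List.takeWhile_append_of_pos
            (fun a ha => hrestd a (List.mem_reverse.mp ha))]
          simp [PySem.Chars.isdigit]
        have hdw : cs.reverse.dropWhile PySem.Chars.isdigit = ['-'] := by
          have h1 : cs.reverse.takeWhile PySem.Chars.isdigit ++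
              cs.reverse.dropWhile PySem.Chars.isdigit = cs.reverse :=
            List.takeWhile_append_dropWhile
          rw [htw] at h1
          rw [hrev] at h1
          rw [hrev]
          exact List.append_cancel_left h1
        rw [htw] at hdrop
        rw [hdw] at htake
        simp only [List.reverse_reverse] at hdrop
        have htake' : cs.take (pvB_scan cs cs.length) = ['-'] := by simpa using htake
        have hcondA : (PySem.Chars.strIsdigit cs ||
            (PySem.List.pyGet? cs 0 == some '-' &&
             PySem.Chars.strIsdigit (List.drop 1 cs))) = true := by
          rw [hhd, htl]; simp
        rw [if_pos hcondA]
        have hDne' : ¬ ((cs.drop (pvB_scan cs cs.length)).isEmpty = true) := by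
          rw [hdrop]
          simp [hrestne]
        rw [if_neg hDne']
        have htok : (cs.take (pvB_scan cs cs.length) == ([] : List Char) ||
            cs.take (pvB_scan cs cs.length) == ['-']) = true := by
          rw [htake']
          decide
        rw [if_pos htok, List.take_append_drop]
      · -- general case: both take the trailing digit run
        have hA : pvA_suffix cs.reverse [] =
            (cs.reverse.takeWhile PySem.Chars.isdigit).reverse := by
          simpa using pvA_suffix_eq cs.reverse []
        simp only [hall, Bool.false_eq_true, if_false, hm, Bool.or_false, hA]
        by_cases hD : (cs.reverse.takeWhile PySem.Chars.isdigit).reverse = []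
        · have hnil : cs.drop (pvB_scan cs cs.length) = [] := by rw [hdrop, hD]
          simp [hD, hnil]
        · have hPne : cs.take (pvB_scan cs cs.length) ≠ [] := by
            intro h
            rw [htake] at h
            have hdw : cs.reverse.dropWhile PySem.Chars.isdigit = [] := by
              simpa using congrArg List.reverse h
            have halld : ∀ x ∈ cs, PySem.Chars.isdigit x = true := fun x hx =>
              List.dropWhile_eq_nil_iff.mp hdw x (List.mem_reverse.mpr hx)
            apply hall
            unfold PySem.Chars.strIsdigit
            simp [hne, List.all_eq_true.mpr halld]
          have hPnm : cs.take (pvB_scan cs cs.length) ≠ ['-'] := by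
            intro h
            have hsplit : (['-'] : List Char) ++
                (cs.reverse.takeWhile PySem.Chars.isdigit).reverse = cs := by
              rw [← h, ← hdrop]
              exact List.take_append_drop _ _
            apply hm
            rw [Bool.and_eq_true]
            constructor
            · rw [← hsplit]
              simp [pysem]
            · have hd1 : cs.drop 1 = (cs.reverse.takeWhile PySem.Chars.isdigit).reverse := by
                conv_lhs => rw [← hsplit]
                simp
              rw [hd1]
              unfold PySem.Chars.strIsdigit
              rw [Bool.and_eq_true]
              refine ⟨by simpa [List.isEmpty_iff] using hD, List.all_eq_true.mpr ?_⟩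
              exact fun x hx => List.mem_takeWhile_imp (List.mem_reverse.mp hx)
          have hDne : ¬ (cs.drop (pvB_scan cs cs.length)).isEmpty = true := by
            rw [hdrop]
            simpa [List.isEmpty_iff] using hD
          have hb1 : (cs.take (pvB_scan cs cs.length) == ([] : List Char)) = false :=
            beq_eq_false_iff_ne.mpr hPne
          have hb2 : (cs.take (pvB_scan cs cs.length) == ['-']) = false :=
            beq_eq_false_iff_ne.mpr hPnm
          have hA1 : (!((cs.reverse.takeWhile PySem.Chars.isdigit).reverse).isEmpty) = true := by
            rw [Bool.not_eq_true']
            exact List.isEmpty_eq_false_iff.mpr hD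
          rw [if_pos hA1, if_neg hDne]
          have htok : ¬ ((cs.take (pvB_scan cs cs.length) == ([] : List Char) ||
              cs.take (pvB_scan cs cs.length) == ['-']) = true) := by
            rw [hb1, hb2]
            decide
          rw [if_neg htok, hdrop]
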